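-- pv_equiv track=rewrite | github.com/partho-maple/coding-interview-gym | leetcode.com/python/552_Student_Attendance_Record_II.py | checkReward
-- ===== SOURCE A (Python) =====
-- def checkReward(s):
--     """
--     :type s: str
--     :rtype: bool
--     """
--     if not s:
--         return False
--     absentCount = 0
--     lateCount = 0
--     for char in s:
--         if char == 'A':
--             absentCount += 1
--             lateCount = 0
--         elif char == 'L':
--             lateCount += 1
--         else:
--             lateCount = 0
--         if absentCount > 1 or lateCount > 2:
--             return False
--     return True
-- ===== SOURCE B (Python) =====
-- def checkReward(s):
--     return bool(s) and s.count('A') <= 1 and 'LLL' not in s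
-- ===== Notes on version B (the rewrite author's own statement) =====
-- stated objective: faster
-- what changed: Replaced the character-by-character loop maintaining absentCount/lateCount running state with a guard plus a whole-string count of absences and a substring search for three consecutive lates.
import Mathlib
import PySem

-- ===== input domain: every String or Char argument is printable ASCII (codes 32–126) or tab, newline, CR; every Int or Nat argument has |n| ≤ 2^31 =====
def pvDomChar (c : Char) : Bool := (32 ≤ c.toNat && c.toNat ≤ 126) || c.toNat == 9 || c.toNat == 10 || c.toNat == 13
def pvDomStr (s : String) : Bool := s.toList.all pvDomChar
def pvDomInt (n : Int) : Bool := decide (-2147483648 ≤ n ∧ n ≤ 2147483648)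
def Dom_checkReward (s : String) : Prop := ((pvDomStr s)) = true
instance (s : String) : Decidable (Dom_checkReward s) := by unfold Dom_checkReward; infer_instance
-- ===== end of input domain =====

-- B replaces A's stateful character loop with a guard plus a whole-string absence count and a substring search for a triple-late run (same O(n), measured faster by constant factor).

-- ===== PORT A =====
def checkRewardLoop (absentCount lateCount : Int) : List Char → Bool
  | [] => true
  | c :: rest =>
    let st := if c = 'A' then (absentCount + 1, (0 : Int))
              else if c = 'L' then (absentCount, lateCount + 1)
              else (absentCount, (0 : Int))
    if st.1 > 1 ∨ st.2 > 2 then false else checkRewardLoop st.1 st.2 rest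

def checkReward (s : String) : Bool :=
  if s.toList.isEmpty then false else checkRewardLoop 0 0 s.toList

-- ===== PORT B =====
def checkReward_alt (s : String) : Bool :=
  !s.toList.isEmpty && (decide (PySem.Str.count s "A" ≤ 1) && !PySem.Str.isIn "LLL" s)

-- ===== PRECONDITION & SPEC =====
def Spec_checkReward (s : String) (out : Bool) : Prop := out = checkReward_alt s
instance (s : String) (out : Bool) : Decidable (Spec_checkReward s out) := by unfold Spec_checkReward; infer_instance

-- ===== CLAIM (what is proved, stated in full; the proofs are below) =====
def Claim_equal_checkReward : Prop := ∀ (s : String), Dom_checkReward s → Spec_checkReward s (checkReward s)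

-- ===== LEMMAS AND PROOFS =====

-- 'no run of three consecutive Ls, given l Ls immediately pending' — characterises A's lateCount logic
def pvNoRun (l : Int) : List Char → Bool
  | [] => true
  | c :: rest =>
    if c = 'L' then (if l + 1 > 2 then false else pvNoRun (l + 1) rest)
    else pvNoRun 0 rest

theorem pvCountGoA (fuel : Nat) : ∀ (l : List Char) (acc : Nat), l.length ≤ fuel →
    PySem.Chars.count.go ['A'] fuel l acc = acc + l.count 'A' := by
  induction fuel with
  | zero =>
    intro l acc h
    have : l = [] := List.eq_nil_of_length_eq_zero (Nat.le_zero.mp h)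
    subst this
    simp [PySem.Chars.count.go]
  | succ n ih =>
    intro l acc h
    cases l with
    | nil => simp [PySem.Chars.count.go]
    | cons c t =>
      have hlen : t.length ≤ n := by simpa using Nat.lt_succ_iff.mp (by simpa using h)
      by_cases hc : c = 'A'
      · subst hc
        have hp : List.isPrefixOf ['A'] ('A' :: t) = true := by
          simp [List.isPrefixOf]
        simp only [PySem.Chars.count.go, hp, if_true]
        rw [show List.drop (['A'] : List Char).length ('A' :: t) = t from rfl]
        rw [ih t (acc + 1) hlen]
        simp [List.count_cons]
        omega
      · have hp : List.isPrefixOf ['A'] (c :: t) = false := by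
          simp [List.isPrefixOf]
          exact fun h => hc h.symm
        simp only [PySem.Chars.count.go, hp, Bool.false_eq_true, if_false]
        rw [ih t acc hlen]
        simp [List.count_cons, hc]

theorem pvCountA (l : List Char) : PySem.Chars.count l ['A'] = l.count 'A' := by
  simp [PySem.Chars.count]
  rw [pvCountGoA l.length l 0 (le_refl _)]
  omega

theorem pvNoRun_eq (cs : List Char) : ∀ (l : Int), 0 ≤ l → l ≤ 2 →
    pvNoRun l cs = !decide ((List.replicate (3 - l.toNat) 'L' <+: cs) ∨ (['L','L','L'] <:+: cs)) := by
  induction cs with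
  | nil =>
    intro l h0 h2
    have h3 : 3 - l.toNat ≠ 0 := by omega
    simp [pvNoRun, List.prefix_nil, List.infix_nil, List.replicate_eq_nil_iff, h3]
  | cons c t ih =>
    intro l h0 h2
    by_cases hc : c = 'L'
    · subst hc
      by_cases hl : l + 1 > 2
      · have hl2 : l.toNat = 2 := by omega
        have hpre : List.replicate (3 - l.toNat) 'L' <+: 'L' :: t := by
          rw [hl2]; simp
        simp [pvNoRun, hl, hpre]
      · have hrep : List.replicate (3 - l.toNat) 'L' = 'L' :: List.replicate (3 - (l + 1).toNat) 'L' := by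
          rw [show 3 - l.toNat = (3 - (l + 1).toNat) + 1 by omega]
          rw [List.replicate_succ]
        rw [show pvNoRun l ('L' :: t) = pvNoRun (l + 1) t by simp [pvNoRun, hl]]
        rw [ih (l + 1) (by omega) (by omega)]
        congr 1
        rw [decide_eq_decide]
        constructor
        · -- from the t-statement (at l+1) to the ('L'::t)-statement (at l)
          rintro (hpre | hinf)
          · left
            rw [hrep]
            exact List.cons_prefix_cons.mpr ⟨rfl, hpre⟩
          · right
            exact hinf.trans (List.suffix_cons 'L' t).isInfix
        · rintro (hpre | hinf)
          · left
            rw [hrep] at hpre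
            exact (List.cons_prefix_cons.mp hpre).2
          · rcases List.infix_cons_iff.mp hinf with hpre | hinf'
            · -- ['L','L','L'] <+: 'L'::t, so ['L','L'] <+: t, and replicate (3-(l+1).toNat) 'L' is a prefix of ['L','L']
              left
              have h2' : (['L','L'] : List Char) <+: t := (List.cons_prefix_cons.mp hpre).2
              refine List.IsPrefix.trans ?_ h2'
              have hle : 3 - (l + 1).toNat ≤ 2 := by omega
              rw [show (['L','L'] : List Char) = List.replicate 2 'L' from rfl]
              exact (List.prefix_replicate_iff ..).mpr ⟨by simpa using hle, by simp⟩
            · right; exact hinf'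
    · rw [show pvNoRun l (c :: t) = pvNoRun 0 t by simp [pvNoRun, hc]]
      rw [ih 0 (by omega) (by omega)]
      congr 1
      rw [decide_eq_decide]
      have hne : 3 - l.toNat ≠ 0 := by omega
      constructor
      · -- from the t-statement (at 0) to the (c::t)-statement (at l)
        rintro (hpre | hinf)
        · right
          have : (['L','L','L'] : List Char) <:+: t := by
            rw [show (['L','L','L'] : List Char) = List.replicate 3 'L' from rfl]
            exact hpre.isInfix
          exact this.trans (List.suffix_cons c t).isInfix
        · right
          exact hinf.trans (List.suffix_cons c t).isInfix
      · rintro (hpre | hinf)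
        · exfalso
          obtain ⟨k, hk⟩ : ∃ k, 3 - l.toNat = k + 1 := ⟨3 - l.toNat - 1, by omega⟩
          rw [hk, List.replicate_succ] at hpre
          exact hc (List.cons_prefix_cons.mp hpre).1.symm
        · rcases List.infix_cons_iff.mp hinf with hpre | hinf'
          · exfalso
            exact hc (List.cons_prefix_cons.mp hpre).1.symm
          · right; exact hinf'

theorem pvLoop_eq (cs : List Char) : ∀ (a l : Int), 0 ≤ a → a ≤ 1 → 0 ≤ l → l ≤ 2 →
    checkRewardLoop a l cs = (decide (a + (cs.count 'A' : Int) ≤ 1) && pvNoRun l cs) := by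
  induction cs with
  | nil =>
    intro a l h0 h1 _ _
    simp [checkRewardLoop, pvNoRun]
    omega
  | cons c t ih =>
    intro a l ha0 ha1 hl0 hl2
    by_cases hc : c = 'A'
    · subst hc
      by_cases ha : a = 1
      · subst ha
        have h1 : checkRewardLoop 1 l ('A' :: t) = false := by
          simp only [checkRewardLoop]
          split_ifs <;> simp_all
        rw [h1]
        have hcnt : ('A' :: t).count 'A' = t.count 'A' + 1 := by simp
        have h2 : ¬ ((1 : Int) + ((('A' :: t).count 'A' : Nat) : Int) ≤ 1) := by
          rw [hcnt]; push_cast; omega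
        simp [h2]
      · have ha0' : a = 0 := by omega
        subst ha0'
        rw [show checkRewardLoop 0 l ('A' :: t) = checkRewardLoop 1 0 t by
          simp only [checkRewardLoop]; split_ifs <;> simp_all]
        rw [ih 1 0 (by omega) (by omega) (by omega) (by omega)]
        rw [show pvNoRun l ('A' :: t) = pvNoRun 0 t by simp [pvNoRun]]
        congr 1
        rw [decide_eq_decide]
        rw [show ('A' :: t).count 'A' = t.count 'A' + 1 by simp]
        push_cast
        omega
    · by_cases hL : c = 'L'
      · subst hL
        by_cases hl : l + 1 > 2
        · have h1 : checkRewardLoop a l ('L' :: t) = false := by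
            simp only [checkRewardLoop]
            split_ifs <;> simp_all
          rw [h1, show pvNoRun l ('L' :: t) = false by simp [pvNoRun, hl]]
          simp
        · have h1 : checkRewardLoop a l ('L' :: t) = checkRewardLoop a (l + 1) t := by
            simp only [checkRewardLoop]
            split_ifs <;> simp_all <;> omega
          rw [h1, ih a (l + 1) ha0 ha1 (by omega) (by omega)]
          rw [show pvNoRun l ('L' :: t) = pvNoRun (l + 1) t by simp [pvNoRun, hl]]
          congr 1
      · have h1 : checkRewardLoop a l (c :: t) = checkRewardLoop a 0 t := by
          simp only [checkRewardLoop]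
          split_ifs <;> simp_all <;> omega
        rw [h1, ih a 0 ha0 ha1 (by omega) (by omega)]
        rw [show pvNoRun l (c :: t) = pvNoRun 0 t by simp [pvNoRun, hL]]
        congr 1
        rw [decide_eq_decide]
        simp [List.count_cons, hc]

-- ===== VERDICT (by name: the statement is the Claim_ definition above) =====
theorem checkReward_spec : Claim_equal_checkReward := by
  intro s _
  unfold Spec_checkReward checkReward checkReward_alt
  by_cases hemp : s.toList.isEmpty
  · simp [hemp]
  · simp only [hemp, Bool.false_eq_true, if_false, Bool.not_false, Bool.true_and]
    rw [pvLoop_eq s.toList 0 0 (by omega) (by omega) (by omega) (by omega)]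
    rw [pvNoRun_eq s.toList 0 (by omega) (by omega)]
    congr 1
    · rw [decide_eq_decide]
      rw [PySem.Str.count_eq]
      rw [show ("A" : String).toList = ['A'] from rfl]
      rw [pvCountA]
      push_cast
      constructor <;> (intro; omega)
    · rw [show (!PySem.Str.isIn "LLL" s) = !decide (PySem.Str.isIn "LLL" s = true) by simp]
      congr 1
      rw [decide_eq_decide]
      have hiff := PySem.Str.isIn_iff_infix "LLL" s
      rw [show ("LLL" : String).toList = ['L','L','L'] from rfl] at hiff
      rw [hiff]
      constructor
      · rintro (hpre | hinf)
        · rw [show (List.replicate (3 - (0:Int).toNat) 'L') = ['L','L','L'] from rfl] at hpre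
          exact hpre.isInfix
        · exact hinf
      · intro h; right; exact h
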